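-- pv_equiv track=rewrite | github.com/Latyr92/Sonatel_Academy | 002_Algo-Python/Exercice6.py | parcour_chaine
-- ===== SOURCE A (Python) =====
-- def transform(l,n):
--     corresp_c_l=[['a','b','c'],['d','e','f'],['g','h','i'],['j','k','l'],['m','n','o'],['p','q','r','s'],['t','u','v'],['w','x','y','z']]
--     corresp_l_c=['a','b','c','d','e','f','g','h','i','j']
--     if(l>="2" and l<="9"):
--         return corresp_c_l[int(l)-2][n]
--     elif(l=="0"):
--         if(n==1):
--             return " "
--         else:
--             return ""
--     elif(l>="a" and l<="j"):
--         for i in range(len(corresp_l_c)):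
--             if(corresp_l_c[i]==l):
--                 return str(i)
--     else:
--         return l
--
-- def parcour_chaine(txt):
--     nb=0
--     p=""
--     for i in range(len(txt)):
--         if((i+1<len(txt))):
--             if(nb<2 and txt[i]==txt[i+1] ):
--                 nb+=1
--             else:
--                 p+=transform(txt[i],nb)
--                 nb=0
--         else:
--             p+=transform(txt[i],nb)
--     return p
-- ===== SOURCE B (Python) =====
-- _KEYPAD = {'2': "abc", '3': "def", '4': "ghi", '5': "jkl",
--            '6': "mno", '7': "pqrs", '8': "tuv", '9': "wxyz"}
--
-- def _piece(c, n):
--     # value of transform(c, n) for n in 0..2, via a keypad dict and ord arithmetic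
--     if '2' <= c <= '9':
--         return _KEYPAD[c][n]
--     if c == '0':
--         return " " if n == 1 else ""
--     if 'a' <= c <= 'j':
--         return chr(48 + ord(c) - 97)
--     return c
--
-- def _emit_run(c, L):
--     # a maximal run of L copies of c decodes as L//3 full cycles plus a remainder
--     return _piece(c, 2) * (L // 3) + (_piece(c, L % 3 - 1) if L % 3 else "")
--
-- def parcour_chaine(txt):
--     parts = []
--     pending = None  # current run: (char, length so far)
--     for ch in txt:
--         if pending is not None and ch == pending[0]:
--             pending = (pending[0], pending[1] + 1)
--         else:
--             if pending is not None:
--                 parts.append(_emit_run(*pending))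
--             pending = (ch, 1)
--     if pending is not None:
--         parts.append(_emit_run(*pending))
--     return "".join(parts)
-- ===== Notes on version B (the rewrite author's own statement) =====
-- stated objective: alternative
-- what changed: Replaced the index-with-lookahead pass over a capped counter by a single run-accumulating fold (pending run flushed on change of character), with each run of length L decoded by closed-form arithmetic (L//3 full cycles plus remainder) through a keypad dict and ord-arithmetic helper instead of the nested lookup tables.
import Mathlib
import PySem

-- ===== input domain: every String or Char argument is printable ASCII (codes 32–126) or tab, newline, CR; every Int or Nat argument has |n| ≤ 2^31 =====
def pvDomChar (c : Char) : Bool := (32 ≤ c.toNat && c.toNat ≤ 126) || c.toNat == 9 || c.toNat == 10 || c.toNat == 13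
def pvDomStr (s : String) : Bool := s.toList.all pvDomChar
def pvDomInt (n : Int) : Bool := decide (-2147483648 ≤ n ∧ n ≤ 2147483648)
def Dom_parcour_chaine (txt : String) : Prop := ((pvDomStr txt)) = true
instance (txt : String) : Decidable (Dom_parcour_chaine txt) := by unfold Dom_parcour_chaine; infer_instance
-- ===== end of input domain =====

-- B replaces A's per-character lookahead pass with a capped counter by a run-accumulating
-- fold with closed-form arithmetic per run and a keypad dict (objective: alternative, same cost).

-- ===== PORT A =====
-- literal port of the module's `transform`; the for-i loop over corresp_l_c:
def transformFind : List Char → Nat → Char → String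
  | [], _, _ => ""          -- Python would fall through returning None; unreachable under the 'a'..'j' guard
  | c :: cs, i, l => if c = l then PySem.Int.toStr i else transformFind cs (i + 1) l

def transformP (l : Char) (n : Nat) : String :=
  let corresp_c_l : List (List Char) :=
    [['a','b','c'],['d','e','f'],['g','h','i'],['j','k','l'],['m','n','o'],['p','q','r','s'],['t','u','v'],['w','x','y','z']]
  let corresp_l_c : List Char := ['a','b','c','d','e','f','g','h','i','j']
  if '2' ≤ l ∧ l ≤ '9' then
    String.singleton ((corresp_c_l.getD (l.toNat - 48 - 2) []).getD n ' ')  -- n ≤ 2 here, default unreachable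
  else if l = '0' then
    if n = 1 then " " else ""
  else if 'a' ≤ l ∧ l ≤ 'j' then
    transformFind corresp_l_c 0 l
  else
    String.singleton l

-- A's loop over indices with lookahead txt[i+1], state (nb, p):
def loopA : List Char → Nat → String → String
  | [], _, p => p
  | [c], nb, p => p ++ transformP c nb
  | c :: d :: rest, nb, p =>
    if nb < 2 ∧ c = d then loopA (d :: rest) (nb + 1) p
    else loopA (d :: rest) 0 (p ++ transformP c nb)

def parcour_chaine (txt : String) : String := loopA txt.toList 0 ""

-- ===== PORT B =====
def keypadB : PySem.Dict Char String :=
  PySem.Dict.ofList [('2', "abc"), ('3', "def"), ('4', "ghi"), ('5', "jkl"),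
                     ('6', "mno"), ('7', "pqrs"), ('8', "tuv"), ('9', "wxyz")]

-- Source B's _piece (only ever called with n ≤ 2)
def pieceB (c : Char) (n : Nat) : String :=
  if '2' ≤ c ∧ c ≤ '9' then
    match PySem.Str.pyGet? (keypadB.getD c "") (Int.ofNat n) with
    | some ch => String.singleton ch
    | none => ""  -- IndexError in Python; unreachable: n ≤ 2, every keypad entry has ≥ 3 letters
  else if c = '0' then (if n = 1 then " " else "")
  else if 'a' ≤ c ∧ c ≤ 'j' then String.singleton (Char.ofNat (48 + c.toNat - 97))
  else String.singleton c

def repeatStrB (s : String) : Nat → String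
  | 0 => ""
  | k + 1 => s ++ repeatStrB s k

-- Source B's _emit_run: a run of L copies of c
def emitRunB (c : Char) (L : Nat) : String :=
  repeatStrB (pieceB c 2) (L / 3) ++ (if L % 3 ≠ 0 then pieceB c (L % 3 - 1) else "")

-- Source B's loop body: state = (parts, pending run)
def stepB (st : List String × Option (Char × Nat)) (ch : Char) : List String × Option (Char × Nat) :=
  match st with
  | (parts, some (p, k)) =>
      if ch = p then (parts, some (p, k + 1))
      else (parts ++ [emitRunB p k], some (ch, 1))
  | (parts, none) => (parts, some (ch, 1))

def parcour_chaine_alt (txt : String) : String :=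
  match txt.toList.foldl stepB ([], none) with
  | (parts, some (p, k)) => String.join (parts ++ [emitRunB p k])
  | (parts, none) => String.join parts

-- ===== PRECONDITION & SPEC =====
def Spec_parcour_chaine (txt : String) (out : String) : Prop := out = parcour_chaine_alt txt
instance (txt : String) (out : String) : Decidable (Spec_parcour_chaine txt out) := by unfold Spec_parcour_chaine; infer_instance

-- ===== CLAIM (what is proved, stated in full; the proofs are below) =====
def Claim_equal_parcour_chaine : Prop := ∀ (txt : String), Dom_parcour_chaine txt → Spec_parcour_chaine txt (parcour_chaine txt)

-- ===== LEMMAS AND PROOFS =====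

-- B's piece agrees with A's transform for the arguments either program uses (n ≤ 2)
theorem pieceB_eq (c : Char) (n : Nat) (hn : n ≤ 2) : pieceB c n = transformP c n := by
  unfold pieceB transformP
  by_cases h1 : '2' ≤ c ∧ c ≤ '9'
  · rw [if_pos h1, if_pos h1]
    have hlo : 50 ≤ c.toNat := h1.1
    have hhi : c.toNat ≤ 57 := h1.2
    have hc := (Char.ofNat_toNat c).symm
    set v := c.toNat with hv
    interval_cases v <;> interval_cases n <;> (rw [hc]; decide)
  · rw [if_neg h1, if_neg h1]
    by_cases h2 : c = '0'
    · simp [h2]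
    · rw [if_neg h2, if_neg h2]
      by_cases h3 : 'a' ≤ c ∧ c ≤ 'j'
      · rw [if_pos h3, if_pos h3]
        have hlo : 97 ≤ c.toNat := h3.1
        have hhi : c.toNat ≤ 106 := h3.2
        have hc := (Char.ofNat_toNat c).symm
        set v := c.toNat with hv
        interval_cases v <;> (rw [hc]; decide)
      · rw [if_neg h3, if_neg h3]

-- canonical run decomposition, the common form both ports are reduced to
def runSpec : List Char → String
  | [] => ""
  | c :: rest =>
    emitRunB c (1 + (rest.takeWhile (· = c)).length) ++ runSpec (rest.dropWhile (· = c))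
termination_by cs => cs.length
decreasing_by
  have := List.length_dropWhile_le (fun d => decide (d = c)) rest
  simp at *; omega

-- ---- A-side: loopA = runSpec ----

theorem loopA_acc (cs : List Char) : ∀ nb p, loopA cs nb p = p ++ loopA cs nb "" := by
  induction cs with
  | nil => intro nb p; simp [loopA]
  | cons c rest ih =>
    intro nb p
    cases rest with
    | nil => simp [loopA]
    | cons d rest' =>
      simp only [loopA]
      split_ifs with h
      · exact ih (nb + 1) p
      · rw [ih 0 (p ++ transformP c nb), ih 0 ("" ++ transformP c nb)]
        simp [String.append_assoc]

theorem emitRunB_step (c : Char) (n : Nat) :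
    emitRunB c (n + 3) = pieceB c 2 ++ emitRunB c n := by
  unfold emitRunB
  have h1 : (n + 3) / 3 = n / 3 + 1 := by omega
  have h2 : (n + 3) % 3 = n % 3 := by omega
  rw [h1, h2]
  have : repeatStrB (pieceB c 2) (n / 3 + 1)
      = pieceB c 2 ++ repeatStrB (pieceB c 2) (n / 3) := rfl
  rw [this, String.append_assoc]

theorem emitRunB_small (c : Char) (nb : Nat) (h : nb ≤ 2) :
    emitRunB c (1 + nb) = transformP c nb := by
  rw [← pieceB_eq c nb h]
  interval_cases nb <;> simp [emitRunB, repeatStrB]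

theorem runA (c : Char) : ∀ (L : Nat) (rest : List Char) (nb : Nat), nb ≤ 2 →
    (∀ d, rest.head? = some d → d ≠ c) →
    loopA (List.replicate (L + 1) c ++ rest) nb "" = emitRunB c (L + 1 + nb) ++ loopA rest 0 "" := by
  intro L
  induction L with
  | zero =>
    intro rest nb hnb hhd
    cases rest with
    | nil =>
      simp only [List.replicate, List.append_nil, loopA]
      rw [emitRunB_small c nb hnb]
      simp
    | cons d rest' =>
      have hdc : ¬ (c = d) := fun h => (hhd d rfl) h.symm
      simp only [List.replicate, List.nil_append, List.cons_append, loopA]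
      rw [if_neg (by tauto)]
      rw [loopA_acc (d :: rest') 0 ("" ++ transformP c nb)]
      rw [emitRunB_small c nb hnb]
      simp
  | succ L ih =>
    intro rest nb hnb hhd
    have hrep : List.replicate (L + 2) c ++ rest
        = c :: c :: (List.replicate L c ++ rest) := by
      simp [List.replicate_succ]
    rw [hrep]
    have hrep2 : (c :: (List.replicate L c ++ rest)) = List.replicate (L + 1) c ++ rest := by
      simp [List.replicate_succ]
    by_cases hnb2 : nb < 2
    · have : loopA (c :: c :: (List.replicate L c ++ rest)) nb ""
          = loopA (c :: (List.replicate L c ++ rest)) (nb + 1) "" := by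
        simp only [loopA]; simp [hnb2]
      rw [this, hrep2, ih rest (nb + 1) (by omega) hhd]
      have : L + 1 + (nb + 1) = L + 2 + nb := by omega
      rw [this]
    · have hnb2' : nb = 2 := by omega
      subst hnb2'
      have : loopA (c :: c :: (List.replicate L c ++ rest)) 2 ""
          = loopA (c :: (List.replicate L c ++ rest)) 0 ("" ++ transformP c 2) := by
        simp only [loopA]; simp
      rw [this, loopA_acc _ 0 ("" ++ transformP c 2), hrep2,
        ih rest 0 (by omega) hhd]
      have h3 : L + 2 + 2 = (L + 1 + 0) + 3 := by omega
      rw [h3, emitRunB_step]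
      rw [pieceB_eq c 2 (by omega)]
      simp [String.append_assoc]

theorem takeWhile_eq_replicate (c : Char) (l : List Char) :
    l.takeWhile (· = c) = List.replicate (l.takeWhile (· = c)).length c := by
  apply List.eq_replicate_of_mem
  intro b hb
  have := List.mem_takeWhile_imp hb
  simpa using this

theorem head_dropWhile_ne (c : Char) (l : List Char) :
    ∀ d, (l.dropWhile (· = c)).head? = some d → d ≠ c := by
  induction l with
  | nil => intro d h; simp [List.dropWhile] at h
  | cons x xs ih =>
    intro d h
    by_cases hx : x = c
    · rw [List.dropWhile_cons_of_pos (by simpa using hx)] at h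
      exact ih d h
    · rw [List.dropWhile_cons_of_neg (by simpa using hx)] at h
      simp at h
      subst h; exact hx

theorem loopA_eq_runSpec : ∀ (n : Nat) (cs : List Char), cs.length ≤ n → loopA cs 0 "" = runSpec cs := by
  intro n
  induction n with
  | zero =>
    intro cs h
    have : cs = [] := by cases cs <;> simp_all
    subst this; simp [loopA, runSpec]
  | succ n ih =>
    intro cs h
    match cs with
    | [] => simp [loopA, runSpec]
    | c :: rest =>
      have hsplit : rest = rest.takeWhile (· = c) ++ rest.dropWhile (· = c) :=
        (List.takeWhile_append_dropWhile).symm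
      set k := (rest.takeWhile (· = c)).length with hk
      have hcs : c :: rest = List.replicate (k + 1) c ++ rest.dropWhile (· = c) := by
        conv_lhs => rw [hsplit]
        rw [takeWhile_eq_replicate c rest]
        simp [List.replicate_succ, hk]
      have hlen : (rest.dropWhile (· = c)).length ≤ n := by
        have h1 := List.length_dropWhile_le (fun d => decide (d = c)) rest
        have h2 : rest.length + 1 ≤ n + 1 := by simpa using h
        omega
      conv_lhs => rw [hcs]
      rw [runA c k (rest.dropWhile (· = c)) 0 (by omega) (head_dropWhile_ne c rest)]
      rw [ih _ hlen]
      simp only [runSpec]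
      have : k + 1 + 0 = 1 + k := by omega
      rw [this]

-- ---- B-side: the fold = runSpec ----

-- the fold only appends to the parts list
theorem foldB_parts (cs : List Char) : ∀ parts pend,
    cs.foldl stepB (parts, pend)
      = (parts ++ (cs.foldl stepB ([], pend)).1, (cs.foldl stepB ([], pend)).2) := by
  induction cs with
  | nil => intro parts pend; simp
  | cons ch cs ih =>
    intro parts pend
    match pend with
    | none =>
      simp only [List.foldl_cons, stepB]
      exact ih parts (some (ch, 1))
    | some (p, k) =>
      simp only [List.foldl_cons, stepB]
      split_ifs with h
      · exact ih parts (some (p, k + 1))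
      · rw [ih (parts ++ [emitRunB p k]) (some (ch, 1))]
        simp only [List.nil_append]
        conv_rhs => rw [ih [emitRunB p k] (some (ch, 1))]
        simp

theorem joinFoldlAcc (parts : List String) : ∀ s : String,
    List.foldl (fun r t => r ++ t) s parts = s ++ List.foldl (fun r t => r ++ t) "" parts := by
  induction parts with
  | nil => intro s; simp
  | cons t ps ih =>
    intro s
    simp only [List.foldl_cons]
    rw [ih (s ++ t), ih ("" ++ t)]
    simp [String.append_assoc]

-- fold-then-flush, starting from an empty parts list and a pending run
def flushB (cs : List Char) (pend : Option (Char × Nat)) : String :=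
  match cs.foldl stepB ([], pend) with
  | (parts, some (p, k)) => String.join (parts ++ [emitRunB p k])
  | (parts, none) => String.join parts

theorem flushB_parts (cs : List Char) (s : String) (pend : Option (Char × Nat)) :
    (match cs.foldl stepB ([s], pend) with
      | (parts, some (p, k)) => String.join (parts ++ [emitRunB p k])
      | (parts, none) => String.join parts) = s ++ flushB cs pend := by
  rw [show ([s] : List String) = [] ++ [s] from rfl, show ([] : List String) ++ [s] = [s] from rfl]
  rw [foldB_parts cs [s] pend]
  unfold flushB
  cases hfold : cs.foldl stepB ([], pend) with
  | mk parts pend' =>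
    cases pend' <;>
      simp_all [String.join, joinFoldlAcc parts s, String.append_assoc]

theorem flushB_run : ∀ (cs : List Char) (c : Char) (k : Nat),
    flushB cs (some (c, k)) = emitRunB c (k + (cs.takeWhile (· = c)).length) ++ runSpec (cs.dropWhile (· = c)) := by
  intro cs
  induction cs with
  | nil =>
    intro c k
    simp [flushB, runSpec, String.join]
  | cons ch cs ih =>
    intro c k
    by_cases h : ch = c
    · subst h
      have hstep : flushB (ch :: cs) (some (ch, k)) = flushB cs (some (ch, k + 1)) := by
        unfold flushB; simp [stepB]
      rw [hstep, ih ch (k + 1)]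
      rw [List.takeWhile_cons_of_pos (by simp), List.dropWhile_cons_of_pos (by simp)]
      have : k + 1 + (cs.takeWhile (· = ch)).length = k + (cs.takeWhile (· = ch)).length.succ := by omega
      simp only [List.length_cons]
      rw [this]
    · have hstep : flushB (ch :: cs) (some (c, k))
          = (match cs.foldl stepB ([emitRunB c k], some (ch, 1)) with
              | (parts, some (p, k')) => String.join (parts ++ [emitRunB p k'])
              | (parts, none) => String.join parts) := by
        unfold flushB; simp [stepB, h]
      rw [hstep, flushB_parts, ih ch 1]
      rw [List.takeWhile_cons_of_neg (by simpa using h), List.dropWhile_cons_of_neg (by simpa using h)]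
      simp only [List.length_nil, Nat.add_zero, runSpec]

theorem alt_eq_runSpec (cs : List Char) :
    (match cs.foldl stepB ([], none) with
      | (parts, some (p, k)) => String.join (parts ++ [emitRunB p k])
      | (parts, none) => String.join parts) = runSpec cs := by
  cases cs with
  | nil => simp [runSpec, String.join]
  | cons c rest =>
    have : (c :: rest).foldl stepB ([], none) = rest.foldl stepB ([], some (c, 1)) := by
      simp [stepB]
    rw [this]
    have := flushB_run rest c 1
    unfold flushB at this
    rw [this]
    simp only [runSpec]

-- ===== VERDICT (by name: the statement is the Claim_ definition above) =====
theorem parcour_chaine_spec : Claim_equal_parcour_chaine := by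
  intro txt _
  show parcour_chaine txt = parcour_chaine_alt txt
  unfold parcour_chaine parcour_chaine_alt
  rw [loopA_eq_runSpec txt.toList.length txt.toList le_rfl, alt_eq_runSpec]
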